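/-
  THE FOOTPRINT OF A FAILED ALLOCATION (Vorbis/Spec/Alloc.lean: the last conjunct of the failure clause of `setup_malloc.spec` and
  of `setup_temp_malloc.spec`, freeze-9; farm PROBLEM CONTRACT-POST of units start_decoder.5 and start_decoder.6): what a CALLER
  gets from it. Nothing here is used by a proof unit.

  The windows `writes` of the two contracts contain the shadow of the new block `shadowSpan p (p + n)` for EVERY `n`, also for a
  refused one. A refused `n` may be stream data (start_decoder: `len + 1` up to 7FFFFFFFH, `8 · n` up to 7FFFFFF8H); the window
  then ends near 10D00000H, far above the shadow region `[C00000H, E00000H)` which is all that `ShadowUntouched` speaks of. The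
  bytes between are in no window of any caller, so `Returned.same` alone does not let a caller carry its own `Mem.SameExcept`
  over a FAILED call. The failure clause now says what the code really wrote there.

      (1) the failure windows lie inside the contract's own footprint: the new conjunct claims nothing `Returned.same` forbids
      (2) a caller whose windows contain the stack below its own stack pointer and `[f + 8, f + 12)` re-establishes its
          `SameExcept` after a failed `setup_malloc` (the shape of start_decoder's `Frame.same` at its exit `AtERR`)
      (3) the same after a failed `setup_temp_malloc`: the stack alone is enough
      (4) the fact the worker of start_decoder.5 had to assume (its `FailFix`): three literal windows over the callee's entry state
      (5) a byte above the shadow region and off the callee's stack reads the same after a failed call, however large the request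
-/
import Vorbis.Spec.Alloc
namespace Vorbis.Spec.AllocFailTest
open X86 X86.User Asan Vorbis Vorbis.Spec

variable {others : List Obj} {frames : List (Nat × FrameLayout)} {A : Arena} {u v : State}

/-- (1) `setup_malloc`: each of the two failure windows is a window of the contract's footprint at the same entry state. -/
example (w : Span)
    (hw : w ∈ [(⟨(u.reg .rsp).toNat - 80, (u.reg .rsp).toNat⟩ : Span),
      ⟨(u.reg .rdi).toNat + 8, (u.reg .rdi).toNat + 12⟩]) :
    w ∈ (setup_malloc.spec others frames A).footprint u := by
  simp only [X86.User.Spec.footprint, vspec]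
  rcases List.mem_cons.mp hw with rfl | hw
  · exact List.mem_cons_self
  · rw [List.mem_singleton.mp hw]
    exact List.mem_cons_of_mem _ List.mem_cons_self

/-- (1) `setup_temp_malloc`: the one failure window is the stack window of the contract's footprint. -/
example (w : Span) (hw : w ∈ [(⟨(u.reg .rsp).toNat - 80, (u.reg .rsp).toNat⟩ : Span)]) :
    w ∈ (setup_temp_malloc.spec others frames A).footprint u := by
  simp only [X86.User.Spec.footprint, vspec]
  rw [List.mem_singleton.mp hw]
  exact List.mem_cons_self

/-- (2) **The caller's side, `setup_malloc`.** The caller stands at its own stack pointer `R` with `f` in rdi; the `call` has pushed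
the return address, so the callee is entered with `rsp = R − 8`. The caller's windows `ws` contain its stack below `R` (at least
the 88 bytes `[R − 88, R)`: the return address and the callee's 80) and `setup_memory_required`. Whatever it knew of the memory `m`
it started from (`hbase`: the same except `ws` up to the callee's entry) it knows again after the FAILED call. -/
example (ws : List Span) (m : Mem) (R f depth : Nat)
    (hpost : (setup_malloc.spec others frames A).post u v)
    (hnofit : ¬ A.Fits ((u.reg .rsi).toNat % 2 ^ 32))
    (hrsp : (u.reg .rsp).toNat = R - 8) (hrdi : (u.reg .rdi).toNat = f)
    (hdepth : 88 ≤ depth) (hstack : (⟨R - depth, R⟩ : Span) ∈ ws) (hfield : (⟨f + 8, f + 12⟩ : Span) ∈ ws)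
    (hbase : Mem.SameExcept ws m u.mem) :
    Mem.SameExcept ws m v.mem := by
  have hfail := (hpost.2 hnofit).2.2.2
  rw [hrsp, hrdi] at hfail
  refine hbase.step_same hfail ?_
  intro w hw a h1 h2
  rcases List.mem_cons.mp hw with rfl | hw
  · -- the callee's stack lies in the caller's stack window
    refine ⟨⟨R - depth, R⟩, hstack, ?_, ?_⟩
    · show R - depth ≤ a
      have : R - 8 - 80 ≤ a := h1
      omega
    · show a < R
      have : a < R - 8 := h2
      omega
  · -- `setup_memory_required` is a window of the caller
    rw [List.mem_singleton.mp hw] at h1 h2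
    exact ⟨⟨f + 8, f + 12⟩, hfield, h1, h2⟩

/-- (3) **The caller's side, `setup_temp_malloc`**: the stack window alone. -/
example (ws : List Span) (m : Mem) (R depth : Nat)
    (hpost : (setup_temp_malloc.spec others frames A).post u v)
    (hnofit : ¬ A.Fits ((u.reg .rsi).toNat % 2 ^ 32))
    (hrsp : (u.reg .rsp).toNat = R - 8)
    (hdepth : 88 ≤ depth) (hstack : (⟨R - depth, R⟩ : Span) ∈ ws)
    (hbase : Mem.SameExcept ws m u.mem) :
    Mem.SameExcept ws m v.mem := by
  have hfail := (hpost.2 hnofit).2.2.2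
  rw [hrsp] at hfail
  refine hbase.step_same hfail ?_
  intro w hw a h1 h2
  rw [List.mem_singleton.mp hw] at h1 h2
  refine ⟨⟨R - depth, R⟩, hstack, ?_, ?_⟩
  · show R - depth ≤ a
    have : R - 8 - 80 ≤ a := h1
    omega
  · show a < R
    have : a < R - 8 := h2
    omega

/-- (4) **What the worker of start_decoder.5 had to assume** (`FailFix` of its Lemmas.lean, word for word but for the ghost): after
a failed `setup_malloc` the memory is the same except the callee's stack, `setup_memory_required` and `setup_offset`. It is the
failure clause, weakened by one window; the hypothesis `Returned.same` (`_hsame`) is not needed. -/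
example (hpost : (setup_malloc.spec others frames A).post u v)
    (_hsame : Mem.SameExcept ((setup_malloc.spec others frames A).footprint u) u.mem v.mem)
    (hnofit : ¬ A.Fits ((u.reg .rsi).toNat % 2 ^ 32)) :
    Mem.SameExcept [⟨(u.reg .rsp).toNat - 80, (u.reg .rsp).toNat⟩, ⟨(u.reg .rdi).toNat + 8, (u.reg .rdi).toNat + 12⟩,
      ⟨(u.reg .rdi).toNat + 128, (u.reg .rdi).toNat + 132⟩] u.mem v.mem := by
  refine (hpost.2 hnofit).2.2.2.mono ?_
  intro w hw a h1 h2
  refine ⟨w, ?_, h1, h2⟩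
  rcases List.mem_cons.mp hw with rfl | hw
  · exact List.mem_cons_self
  · rw [List.mem_singleton.mp hw]
    exact List.mem_cons_of_mem _ List.mem_cons_self

/-- (5) **The byte of the report's counterexample**: an address at or above E00000H (beyond the shadow region, so `ShadowUntouched`
says nothing of it) and off the stack region reads the same after a failed `setup_malloc`, for EVERY request size — although for
`n` = 7FFFFFFFH it lies inside the third window of `writes`. (`*f` is below C00000H: `ObjLive.where_`; the stack below 800000H.) -/
example (a : Word)
    (hpost : (setup_malloc.spec others frames A).post u v)
    (hnofit : ¬ A.Fits ((u.reg .rsi).toNat % 2 ^ 32))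
    (hstack : (u.reg .rsp).toNat ≤ 0x800000) (hobj : (u.reg .rdi).toNat + 1808 ≤ 0xC00000)
    (ha : 0xE00000 ≤ a.toNat) :
    v.mem.read a = u.mem.read a := by
  apply (hpost.2 hnofit).2.2.2
  intro w hw
  rcases List.mem_cons.mp hw with rfl | hw
  · right
    show (u.reg .rsp).toNat ≤ a.toNat
    omega
  · rw [List.mem_singleton.mp hw]
    right
    show (u.reg .rdi).toNat + 12 ≤ a.toNat
    omega

end Vorbis.Spec.AllocFailTest
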